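-- pv_equiv track=rewrite | github.com/Naboni/Competitive-Programming | A_Scuza.py | solve
-- ===== SOURCE A (Python) =====
-- def bisectRight(arr, target):
--     left, right = 0, len(arr)-1
--     while left <= right:
--         mid = (left + right) // 2
--         if arr[mid] <= target:
--             left = mid + 1
--         else:
--             right = mid - 1
--     return left
--
-- def solve(n, q, hei, que):
--     arr = [hei[0]]
--     for a in hei[1:]:
--         arr.append(max(a, arr[-1]))
--     height = [hei[0]]
--     for a in hei[1:]:
--         height.append(a+height[-1])
--     ans = []
--     for q in que:
--         i = bisectRight(arr, q)
--         if i==0: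
--             ans.append(0)
--         else:
--             ans.append(height[i-1])
--     return ans
-- ===== SOURCE B (Python) =====
-- def solve(n, q, hei, que):
--     # one fused pass builds (prefix-max, prefix-sum) pairs; each query walks the
--     # monotone pair list keeping the last reachable prefix-sum (no binary search)
--     pairs = []
--     m = 0
--     s = 0
--     for h in hei:
--         if not pairs:
--             m = h
--             s = h
--         else:
--             if h > m:
--                 m = h
--             s = s + h
--         pairs.append((m, s))
--     res = []
--     for t in que:
--         best = 0
--         for mx, sm in pairs:
--             if mx > t:
--                 break
--             best = sm
--         res.append(best)
--     return res
-- ===== Notes on version B (the rewrite author's own statement) =====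
-- stated objective: alternative
-- what changed: B fuses prefix-max and prefix-sum into one pass over a single (max,sum) pair list and answers each query by an early-exit linear walk over that monotone list, instead of A's two separate prefix arrays plus a hand-written binary search per query.
import Mathlib
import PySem

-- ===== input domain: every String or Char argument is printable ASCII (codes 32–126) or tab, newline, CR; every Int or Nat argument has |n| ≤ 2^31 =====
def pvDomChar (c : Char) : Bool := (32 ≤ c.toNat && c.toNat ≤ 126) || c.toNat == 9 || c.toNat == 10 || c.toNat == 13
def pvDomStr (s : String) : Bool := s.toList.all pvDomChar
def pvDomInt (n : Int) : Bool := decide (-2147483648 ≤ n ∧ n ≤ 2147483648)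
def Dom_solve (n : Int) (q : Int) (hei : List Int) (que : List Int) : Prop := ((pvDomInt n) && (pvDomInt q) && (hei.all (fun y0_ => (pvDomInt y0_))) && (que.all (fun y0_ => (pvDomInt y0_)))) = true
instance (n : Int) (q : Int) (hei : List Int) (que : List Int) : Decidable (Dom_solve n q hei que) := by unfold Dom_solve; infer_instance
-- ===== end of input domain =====

-- B replaces A's two prefix arrays + per-query binary search by one fused (max,sum)
-- pair list and an early-exit linear walk per query (alternative decomposition, not faster).

-- ===== PORT A =====
-- the while-loop of A's hand-written bisectRight; arr[mid] is always in range on the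
-- inputs reached from bisectRightA under Pre_, so pyGetD's default is never used
def bisectLoop (arr : List Int) (target : Int) (left right : Int) : Int :=
  if left ≤ right then
    let mid := PySem.Int.floordiv (left + right) 2
    if PySem.List.pyGetD arr mid 0 ≤ target then
      bisectLoop arr target (mid + 1) right
    else
      bisectLoop arr target left (mid - 1)
  else left
termination_by (right - left + 1).toNat
decreasing_by
  all_goals
    have h2 := PySem.Int.floordiv_two_mid_bounds (lo := left) (hi := right) (by omega)
    omega

def bisectRightA (arr : List Int) (target : Int) : Int :=
  bisectLoop arr target 0 ((arr.length : Int) - 1)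

def solve (n : Int) (q : Int) (hei : List Int) (que : List Int) : List Int :=
  let arr := (PySem.List.slice hei (some 1) none).foldl
    (fun acc a => acc ++ [max a (PySem.List.pyGetD acc (-1) 0)]) [PySem.List.pyGetD hei 0 0]
  let height := (PySem.List.slice hei (some 1) none).foldl
    (fun acc a => acc ++ [a + PySem.List.pyGetD acc (-1) 0]) [PySem.List.pyGetD hei 0 0]
  que.foldl (fun ans q =>
    let i := bisectRightA arr q
    if i = 0 then ans ++ [0] else ans ++ [PySem.List.pyGetD height (i - 1) 0]) []

-- ===== PORT B =====
-- one fused pass: state (pairs, m, s)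
def buildPairs (hei : List Int) : List (Int × Int) × Int × Int :=
  hei.foldl (fun st h =>
    let m := if st.1.isEmpty then h else (if h > st.2.1 then h else st.2.1)
    let s := if st.1.isEmpty then h else st.2.2 + h
    (st.1 ++ [(m, s)], m, s)) ([], 0, 0)

-- the inner for/break loop of B
def scanAns (t : Int) (best : Int) : List (Int × Int) → Int
  | [] => best
  | p :: rest => if p.1 > t then best else scanAns t p.2 rest

def solve_alt (n : Int) (q : Int) (hei : List Int) (que : List Int) : List Int :=
  que.map (fun t => scanAns t 0 (buildPairs hei).1)

-- ===== PRECONDITION & SPEC =====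
-- Pre_ excludes only empty hei, on which Python A raises IndexError at hei[0]
def Pre_solve (n : Int) (q : Int) (hei : List Int) (que : List Int) : Prop := hei ≠ []
instance (n : Int) (q : Int) (hei : List Int) (que : List Int) : Decidable (Pre_solve n q hei que) := by unfold Pre_solve; infer_instance
def pvWitness_solve : Int × Int × List Int × List Int := (3, 2, [1, 3, 2], [2, 5])

def Spec_solve (n : Int) (q : Int) (hei : List Int) (que : List Int) (out : List Int) : Prop := out = solve_alt n q hei que
instance (n : Int) (q : Int) (hei : List Int) (que : List Int) (out : List Int) : Decidable (Spec_solve n q hei que out) := by unfold Spec_solve; infer_instance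

-- ===== CLAIM (what is proved, stated in full; the proofs are below) =====
def Claim_equal_solve : Prop := ∀ (n : Int) (q : Int) (hei : List Int) (que : List Int), Dom_solve n q hei que → Pre_solve n q hei que → Spec_solve n q hei que (solve n q hei que)

-- ===== LEMMAS AND PROOFS =====

-- reference recursions used only by the proofs
def pmList (x : Int) : List Int → List Int
  | [] => [x]
  | a :: r => x :: pmList (max a x) r

def psList (x : Int) : List Int → List Int
  | [] => [x]
  | a :: r => x :: psList (a + x) r

def zpList (m s : Int) : List Int → List (Int × Int)
  | [] => [(m, s)]
  | h :: r => (m, s) :: zpList (max h m) (s + h) r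

def zfin (m s : Int) : List Int → Int × Int
  | [] => (m, s)
  | h :: r => zfin (max h m) (s + h) r

def cnt (t m : Int) (rest : List Int) : Nat :=
  ((pmList m rest).takeWhile (fun x => decide (x ≤ t))).length

theorem fold_arr_eq (rest : List Int) : ∀ (pre : List Int) (m : Int),
    rest.foldl (fun acc a => acc ++ [max a (PySem.List.pyGetD acc (-1) 0)]) (pre ++ [m])
      = pre ++ pmList m rest := by
  induction rest with
  | nil => intro pre m; simp [pmList]
  | cons a r ih =>
    intro pre m
    simp only [List.foldl_cons, PySem.List.pyGetD_neg_one_append_singleton]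
    rw [ih (pre ++ [m]) (max a m)]
    simp [pmList]

theorem fold_arr_eq' (rest : List Int) (m : Int) :
    rest.foldl (fun acc a => acc ++ [max a (PySem.List.pyGetD acc (-1) 0)]) [m]
      = pmList m rest := by
  have := fold_arr_eq rest [] m; simpa using this

theorem fold_height_eq (rest : List Int) : ∀ (pre : List Int) (s : Int),
    rest.foldl (fun acc a => acc ++ [a + PySem.List.pyGetD acc (-1) 0]) (pre ++ [s])
      = pre ++ psList s rest := by
  induction rest with
  | nil => intro pre s; simp [psList]
  | cons a r ih =>
    intro pre s
    simp only [List.foldl_cons, PySem.List.pyGetD_neg_one_append_singleton]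
    rw [ih (pre ++ [s]) (a + s)]
    simp [psList]

theorem fold_height_eq' (rest : List Int) (s : Int) :
    rest.foldl (fun acc a => acc ++ [a + PySem.List.pyGetD acc (-1) 0]) [s]
      = psList s rest := by
  have := fold_height_eq rest [] s; simpa using this

theorem buildPairs_fold (rest : List Int) : ∀ (pre : List (Int × Int)) (m s : Int),
    rest.foldl (fun st h =>
      let m := if st.1.isEmpty then h else (if h > st.2.1 then h else st.2.1)
      let s := if st.1.isEmpty then h else st.2.2 + h
      (st.1 ++ [(m, s)], m, s)) (pre ++ [(m, s)], m, s)
    = (pre ++ zpList m s rest, zfin m s rest) := by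
  induction rest with
  | nil => intro pre m s; simp [zpList, zfin]
  | cons h r ih =>
    intro pre m s
    have hne : (pre ++ [(m, s)]).isEmpty = false := by simp
    have hmax : (if h > m then h else m) = max h m := by omega
    simp only [List.foldl_cons, hne, Bool.false_eq_true, if_false, hmax]
    rw [ih (pre ++ [(m, s)]) (max h m) (s + h)]
    simp [zpList, zfin]

theorem buildPairs_eq (h0 : Int) (rest : List Int) :
    (buildPairs (h0 :: rest)).1 = zpList h0 h0 rest := by
  unfold buildPairs
  simp only [List.foldl_cons, List.isEmpty_nil, if_true, List.nil_append]
  rw [show [((h0 : Int), (h0 : Int))] = ([] : List (Int × Int)) ++ [(h0, h0)] from rfl]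
  rw [buildPairs_fold rest [] h0 h0]
  simp

theorem scan_eq (rest : List Int) : ∀ (m s t best : Int),
    scanAns t best (zpList m s rest) =
      if cnt t m rest = 0 then best else (psList s rest).getD (cnt t m rest - 1) 0 := by
  induction rest with
  | nil =>
    intro m s t best
    by_cases h : m ≤ t <;>
      simp [zpList, scanAns, cnt, pmList, psList, h, List.takeWhile] <;> omega
  | cons h r ih =>
    intro m s t best
    by_cases hmt : m ≤ t
    · have h1 : ¬ m > t := by omega
      simp only [zpList, scanAns, h1, if_neg (by omega : ¬ m > t)]
      rw [ih (max h m) (s + h) t s]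
      have hc : cnt t m (h :: r) = cnt t (max h m) r + 1 := by
        simp [cnt, pmList, List.takeWhile, hmt]
      rw [hc]
      rcases Nat.eq_zero_or_pos (cnt t (max h m) r) with h0 | h0
      · simp [h0, psList]
      · obtain ⟨k, hk⟩ : ∃ k, cnt t (max h m) r = k + 1 :=
          ⟨cnt t (max h m) r - 1, by omega⟩
        rw [hk, Int.add_comm s h]
        simp [psList, List.getD_cons_succ]
    · have hc : cnt t m (h :: r) = 0 := by
        simp [cnt, pmList, List.takeWhile, hmt]
      simp [zpList, scanAns, hc, if_pos (by omega : m > t)]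

theorem pmList_le (r : List Int) : ∀ (m x : Int), x ∈ pmList m r → m ≤ x := by
  induction r with
  | nil => intro m x hx; simp [pmList] at hx; omega
  | cons a r ih =>
    intro m x hx
    simp only [pmList, List.mem_cons] at hx
    rcases hx with rfl | hx
    · omega
    · exact le_trans (le_max_right a m) (ih _ _ hx)

theorem pmList_pairwise (r : List Int) : ∀ m, (pmList m r).Pairwise (· ≤ ·) := by
  induction r with
  | nil => intro m; simp [pmList]
  | cons a r ih =>
    intro m
    simp only [pmList, List.pairwise_cons]
    exact ⟨fun x hx => le_trans (le_max_right a m) (pmList_le r _ x hx), ih _⟩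

theorem pmList_length (r : List Int) : ∀ m, (pmList m r).length = r.length + 1 := by
  induction r with
  | nil => intro m; simp [pmList]
  | cons a r ih => intro m; simp [pmList, ih]

theorem takeWhile_getElem_le (xs : List Int) (t : Int) (j : Nat)
    (hj : j < xs.length)
    (h : j < (xs.takeWhile (fun x => decide (x ≤ t))).length) :
    xs[j] ≤ t := by
  have hpre := List.takeWhile_prefix (l := xs) (fun x => decide (x ≤ t))
  have hmem : (xs.takeWhile (fun x => decide (x ≤ t)))[j] ∈
      xs.takeWhile (fun x => decide (x ≤ t)) := List.getElem_mem h
  have hp := List.mem_takeWhile_imp hmem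
  rw [hpre.getElem h] at hp
  exact of_decide_eq_true hp

theorem takeWhile_boundary_gt (xs : List Int) (t : Int)
    (h : (xs.takeWhile (fun x => decide (x ≤ t))).length < xs.length) :
    ¬ (xs[(xs.takeWhile (fun x => decide (x ≤ t))).length]'h ≤ t) := by
  have hsplit := List.takeWhile_append_dropWhile
    (p := fun x => decide (x ≤ t)) (l := xs)
  have hlen : (xs.takeWhile (fun x => decide (x ≤ t))).length
      + (xs.dropWhile (fun x => decide (x ≤ t))).length = xs.length := by
    conv_rhs => rw [← hsplit]
    rw [List.length_append]
  have hdne : xs.dropWhile (fun x => decide (x ≤ t)) ≠ [] := by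
    intro hnil
    rw [hnil] at hlen
    simp at hlen
    omega
  have hhead := List.head_dropWhile_not (fun x => decide (x ≤ t)) hdne
  have hx : xs[(xs.takeWhile (fun x => decide (x ≤ t))).length]'h
      = (xs.dropWhile (fun x => decide (x ≤ t))).head hdne := by
    rw [List.getElem_of_eq hsplit.symm h,
      List.getElem_append_right (Nat.le_refl _)]
    simp [List.head_eq_getElem]
  rw [hx]
  simpa using hhead

theorem bisectLoop_eq (xs : List Int) (t : Int) (hs : xs.Pairwise (· ≤ ·)) :
    ∀ (fuel : Nat) (left right : Int),
      (right - left + 1).toNat ≤ fuel →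
      0 ≤ left → right ≤ (xs.length : Int) - 1 → left ≤ right + 1 →
      left ≤ ((xs.takeWhile (fun x => decide (x ≤ t))).length : Int) →
      ((xs.takeWhile (fun x => decide (x ≤ t))).length : Int) ≤ right + 1 →
      bisectLoop xs t left right
        = ((xs.takeWhile (fun x => decide (x ≤ t))).length : Int) := by
  intro fuel
  induction fuel with
  | zero =>
    intro left right hf h0 hr hlr hlc hcr
    rw [bisectLoop, if_neg (by omega)]
    omega
  | succ f ih =>
    intro left right hf h0 hr hlr hlc hcr
    by_cases hle : left ≤ right
    · rw [bisectLoop, if_pos hle]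
      have hmid := PySem.Int.floordiv_two_mid_bounds (by omega : left ≤ right)
      set mid := PySem.Int.floordiv (left + right) 2 with hmiddef
      show (if PySem.List.pyGetD xs mid 0 ≤ t then bisectLoop xs t (mid + 1) right
            else bisectLoop xs t left (mid - 1))
          = ((xs.takeWhile (fun x => decide (x ≤ t))).length : Int)
      have hb : mid.toNat < xs.length := by omega
      have hget := PySem.List.pyGetD_eq_getElem (xs := xs) (i := mid) (d := 0)
        (by omega) (by omega)
      by_cases hx : xs[mid.toNat]'hb ≤ t
      · rw [hget, if_pos hx]
        have hlt : mid.toNat < (xs.takeWhile (fun x => decide (x ≤ t))).length := by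
          by_contra hcon
          push_neg at hcon
          have hclen : (xs.takeWhile (fun x => decide (x ≤ t))).length < xs.length := by omega
          have hbad := takeWhile_boundary_gt xs t hclen
          rcases Nat.lt_or_ge (xs.takeWhile (fun x => decide (x ≤ t))).length mid.toNat with hlt' | hge
          · have := (List.pairwise_iff_getElem.mp hs) _ _ hclen hb hlt'
            omega
          · have heq : (xs.takeWhile (fun x => decide (x ≤ t))).length = mid.toNat := by
              omega
            simp only [heq] at hbad
            exact hbad hx
        exact ih (mid + 1) right (by omega) (by omega) hr (by omega) (by omega) hcr
      · rw [hget, if_neg hx]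
        have hge : (xs.takeWhile (fun x => decide (x ≤ t))).length ≤ mid.toNat := by
          by_contra hcon
          push_neg at hcon
          exact hx (takeWhile_getElem_le xs t mid.toNat hb hcon)
        exact ih left (mid - 1) (by omega) h0 (by omega) (by omega) hlc (by omega)
    · rw [bisectLoop, if_neg hle]
      omega

theorem bisectRightA_eq (m : Int) (rest : List Int) (t : Int) :
    bisectRightA (pmList m rest) t = (cnt t m rest : Int) := by
  have hlen : ((pmList m rest).takeWhile (fun x => decide (x ≤ t))).length
      ≤ (pmList m rest).length :=
    List.IsPrefix.length_le (List.takeWhile_prefix (l := pmList m rest) _)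
  have hpos : 1 ≤ (pmList m rest).length := by simp [pmList_length]
  unfold bisectRightA
  exact bisectLoop_eq (pmList m rest) t (pmList_pairwise rest m)
    (pmList m rest).length 0 ((pmList m rest).length - 1)
    (by omega) le_rfl (by omega) (by omega) (by omega) (by omega)

theorem query_eq (h0 : Int) (rest : List Int) (t : Int) :
    (if bisectRightA (pmList h0 rest) t = 0 then (0 : Int)
     else PySem.List.pyGetD (psList h0 rest) (bisectRightA (pmList h0 rest) t - 1) 0)
    = scanAns t 0 (zpList h0 h0 rest) := by
  rw [bisectRightA_eq, scan_eq]
  rcases Nat.eq_zero_or_pos (cnt t h0 rest) with hc | hc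
  · simp [hc]
  · rw [if_neg (by exact_mod_cast by omega), if_neg (by omega)]
    have h1 : ((cnt t h0 rest : Int) - 1) = ((cnt t h0 rest - 1 : Nat) : Int) := by omega
    rw [h1, PySem.List.pyGetD_natCast]

theorem foldl_ans (arr height : List Int) (que : List Int) : ∀ acc : List Int,
    que.foldl (fun ans q =>
      let i := bisectRightA arr q
      if i = 0 then ans ++ [0] else ans ++ [PySem.List.pyGetD height (i - 1) 0]) acc
    = acc ++ que.map (fun q =>
        if bisectRightA arr q = 0 then 0
        else PySem.List.pyGetD height (bisectRightA arr q - 1) 0) := by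
  induction que with
  | nil => intro acc; simp
  | cons qh qt ih =>
    intro acc
    simp only [List.foldl_cons, List.map_cons]
    by_cases h : bisectRightA arr qh = 0 <;> simp [h, ih]

theorem solve_eq_alt (n q : Int) (hei que : List Int) (h : hei ≠ []) :
    solve n q hei que = solve_alt n q hei que := by
  obtain ⟨h0, rest, rfl⟩ := List.exists_cons_of_ne_nil h
  unfold solve solve_alt
  rw [PySem.List.slice_from_one]
  simp only [List.tail_cons, PySem.List.pyGetD_zero_cons]
  rw [fold_arr_eq', fold_height_eq', foldl_ans, buildPairs_eq]
  simp only [List.nil_append]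
  have hfun : (fun t =>
      if bisectRightA (pmList h0 rest) t = 0 then (0 : Int)
      else PySem.List.pyGetD (psList h0 rest) (bisectRightA (pmList h0 rest) t - 1) 0)
      = fun t => scanAns t 0 (zpList h0 h0 rest) :=
    funext fun t => query_eq h0 rest t
  rw [hfun]

-- ===== VERDICT (by name: the statement is the Claim_ definition above) =====
theorem solve_spec : Claim_equal_solve := by
  intro n q hei que _ hpre
  exact solve_eq_alt n q hei que hpre
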